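-- pv_equiv track=rewrite | github.com/Ridealist/CodingTest | CodingTest_문제풀이/프로그래머스_2단계/JadenCase.py | solution
-- ===== SOURCE A (Python) =====
-- def solution(s):
--     answer = ''
--     # 변수명 설정의 중요성!
--     first_alph = True
--     for c in s:
--         if c == " ":
--             answer += c
--             first_alph = True
--         else:
--             if first_alph:
--                 answer += c.upper()
--                 first_alph = False
--             else:
--                 answer += c.lower()
--     return answer
-- ===== SOURCE B (Python) =====
-- def solution(s):
--     return " ".join(w[:1].upper() + w[1:].lower() for w in s.split(" "))
-- ===== Notes on version B (the rewrite author's own statement) =====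
-- stated objective: idiomatic
-- what changed: Replaced the character-by-character scan with a running first_alph flag by a word-level transform: split on the space delimiter, map each word to w[:1].upper() + w[1:].lower(), and rejoin with join.
import Mathlib
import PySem

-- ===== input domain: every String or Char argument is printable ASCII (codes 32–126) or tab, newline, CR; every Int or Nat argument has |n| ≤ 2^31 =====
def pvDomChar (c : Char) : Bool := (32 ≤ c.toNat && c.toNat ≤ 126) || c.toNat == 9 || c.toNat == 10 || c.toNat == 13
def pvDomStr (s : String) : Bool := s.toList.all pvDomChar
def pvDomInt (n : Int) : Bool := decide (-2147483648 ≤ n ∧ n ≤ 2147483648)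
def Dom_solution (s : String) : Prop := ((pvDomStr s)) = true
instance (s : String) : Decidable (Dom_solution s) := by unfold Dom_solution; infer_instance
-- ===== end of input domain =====

-- B replaces A's character scan with a running flag by split(" ") / per-word slicing / " ".join (idiomatic word-level decomposition).

-- ===== PORT A =====
-- the loop body: state is (answer so far, first_alph)
def solutionStep (st : List Char × Bool) (c : Char) : List Char × Bool :=
  if c = ' ' then (st.1 ++ [c], true)
  else if st.2 then (st.1 ++ [PySem.Chars.upperChar c], false)
  else (st.1 ++ [PySem.Chars.lowerChar c], false)

def solution (s : String) : String :=
  String.ofList (s.toList.foldl solutionStep ([], true)).1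

-- ===== PORT B =====
-- w[:1].upper() + w[1:].lower()
def solutionWord (w : List Char) : List Char :=
  PySem.Chars.upper (PySem.List.slice w none (some 1)) ++
    PySem.Chars.lower (PySem.List.slice w (some 1) none)

def solution_alt (s : String) : String :=
  String.ofList (PySem.Chars.join [' '] ((PySem.Chars.splitOn s.toList [' ']).map solutionWord))

-- ===== PRECONDITION & SPEC =====
def Spec_solution (s : String) (out : String) : Prop := out = solution_alt s
instance (s : String) (out : String) : Decidable (Spec_solution s out) := by unfold Spec_solution; infer_instance

-- ===== CLAIM (what is proved, stated in full; the proofs are below) =====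
def Claim_equal_solution : Prop := ∀ (s : String), Dom_solution s → Spec_solution s (solution s)

-- ===== LEMMAS AND PROOFS =====

-- functional form of A's loop: F cs b = characters A appends scanning cs with first_alph = b
def solF : List Char → Bool → List Char
  | [], _ => []
  | c :: cs, b =>
    if c = ' ' then c :: solF cs true
    else (if b then PySem.Chars.upperChar c else PySem.Chars.lowerChar c) :: solF cs false

theorem foldl_solutionStep (cs : List Char) (ans : List Char) (b : Bool) :
    (cs.foldl solutionStep (ans, b)).1 = ans ++ solF cs b := by
  induction cs generalizing ans b with
  | nil => simp [solF]
  | cons c cs ih =>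
    by_cases hc : c = ' '
    · simp [solutionStep, solF, hc, ih]
    · cases b <;> simp [solutionStep, solF, hc, ih]

-- mySplit cs = cs.split(" ") (single-space separator), structurally
def mySplit : List Char → List (List Char)
  | [] => [[]]
  | c :: cs =>
    if c = ' ' then [] :: mySplit cs
    else
      match mySplit cs with
      | [] => [[c]]
      | w :: ws => (c :: w) :: ws

theorem mySplit_ne_nil (cs : List Char) : mySplit cs ≠ [] := by
  cases cs with
  | nil => simp [mySplit]
  | cons c cs =>
    simp only [mySplit]
    split
    · simp
    · split <;> simp

theorem splitOn_go_space (cs : List Char) (fuel : Nat) (cur : List Char)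
    (acc : List (List Char)) (h : cs.length ≤ fuel) :
    PySem.Chars.splitOn.go [' '] fuel cs cur acc =
      acc.reverse ++
        (match mySplit cs with
         | [] => [cur.reverse]
         | w :: ws => (cur.reverse ++ w) :: ws) := by
  induction cs generalizing fuel cur acc with
  | nil =>
    cases fuel <;> simp [PySem.Chars.splitOn.go, mySplit]
  | cons c cs ih =>
    cases fuel with
    | zero => simp at h
    | succ f =>
      rw [PySem.Chars.splitOn.go.eq_def]
      simp only []
      by_cases hc : c = ' '
      · subst hc
        have hp : List.isPrefixOf [' '] (' ' :: cs) = true := by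
          simp [List.isPrefixOf]
        rw [if_pos hp]
        simp only [List.length_cons, List.length_nil, List.drop_succ_cons, List.drop_zero] at *
        rw [ih f [] (cur.reverse :: acc) (by omega)]
        rcases hw : mySplit cs with _ | ⟨w, ws⟩
        · exact absurd hw (mySplit_ne_nil cs)
        · simp [mySplit, hw]
      · have hp : List.isPrefixOf [' '] (c :: cs) = false := by
          simp [List.isPrefixOf]
          exact fun h' => hc h'.symm
        rw [if_neg (by simp [hp])]
        simp only [List.length_cons] at h
        rw [ih f (c :: cur) acc (by omega)]
        rcases hw : mySplit cs with _ | ⟨w, ws⟩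
        · exact absurd hw (mySplit_ne_nil cs)
        · simp [mySplit, hw, hc]

theorem splitOn_space (cs : List Char) :
    PySem.Chars.splitOn cs [' '] = mySplit cs := by
  unfold PySem.Chars.splitOn
  rw [splitOn_go_space cs (cs.length + 1) [] [] (by omega)]
  rcases hw : mySplit cs with _ | ⟨w, ws⟩
  · exact absurd hw (mySplit_ne_nil cs)
  · simp

theorem solutionWord_nil : solutionWord [] = [] := by decide

theorem solutionWord_cons (c : Char) (w : List Char) :
    solutionWord (c :: w) = PySem.Chars.upperChar c :: PySem.Chars.lower w := by
  have h1 : PySem.List.slice (c :: w) none (some 1) = [c] := by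
    have := PySem.List.slice_to_natCast (c :: w) 1
    simpa using this
  have h2 : PySem.List.slice (c :: w) (some 1) none = w := by
    have := PySem.List.slice_from_natCast (c :: w) 1
    simpa using this
  simp [solutionWord, h1, h2, PySem.Chars.upper]

-- join [' '] with the head word mapped by h, the rest by solutionWord
def joinH (h : List Char → List Char) (cs : List Char) : List Char :=
  match mySplit cs with
  | [] => []
  | w :: ws => PySem.Chars.join [' '] (h w :: ws.map solutionWord)

theorem join_cons_head (sep : List Char) (a : Char) (x : List Char) (ws : List (List Char)) :
    PySem.Chars.join sep ((a :: x) :: ws) = a :: PySem.Chars.join sep (x :: ws) := by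
  cases ws <;> simp [PySem.Chars.join, List.intercalate]

theorem lower_nil : PySem.Chars.lower [] = [] := by simp [PySem.Chars.lower]

theorem lower_cons (c : Char) (w : List Char) :
    PySem.Chars.lower (c :: w) = PySem.Chars.lowerChar c :: PySem.Chars.lower w := by
  simp [PySem.Chars.lower]

theorem joinH_eq (cs : List Char) :
    joinH solutionWord cs = solF cs true ∧ joinH PySem.Chars.lower cs = solF cs false := by
  induction cs with
  | nil =>
    constructor <;> simp [joinH, mySplit, PySem.Chars.join, List.intercalate,
      solutionWord_nil, lower_nil, solF]
  | cons c cs ih =>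
    rcases hw : mySplit cs with _ | ⟨w, ws⟩
    · exact absurd hw (mySplit_ne_nil cs)
    · by_cases hc : c = ' '
      · subst hc
        have hm : mySplit (' ' :: cs) = [] :: w :: ws := by simp [mySplit, hw]
        have hF : ∀ b, solF (' ' :: cs) b = ' ' :: solF cs true := by intro b; simp [solF]
        have key : ∀ (z : List Char), z = [] →
            PySem.Chars.join [' '] (z :: (w :: ws).map solutionWord) =
              ' ' :: joinH solutionWord cs := by
          intro z hz; subst hz
          rw [List.map_cons, PySem.Chars.join_cons_cons]
          simp [joinH, hw]
        constructor
        · simp only [joinH, hm, List.map_cons]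
          rw [← List.map_cons, key _ solutionWord_nil, ih.1, hF]
        · simp only [joinH, hm, List.map_cons]
          rw [← List.map_cons, key _ lower_nil, ih.1, hF]
      · have hm : mySplit (c :: cs) = (c :: w) :: ws := by simp [mySplit, hc, hw]
        have hj : joinH PySem.Chars.lower cs = solF cs false := ih.2
        simp only [joinH, hw] at hj
        constructor
        · simp only [joinH, hm, solutionWord_cons, join_cons_head]
          rw [hj]
          simp [solF, hc]
        · simp only [joinH, hm, lower_cons, join_cons_head]
          rw [hj]
          simp [solF, hc]

theorem list_eq_solution (cs : List Char) :
    PySem.Chars.join [' '] ((mySplit cs).map solutionWord) = solF cs true := by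
  have h := (joinH_eq cs).1
  rcases hw : mySplit cs with _ | ⟨w, ws⟩
  · exact absurd hw (mySplit_ne_nil cs)
  · simpa only [joinH, hw, List.map_cons] using h

-- ===== VERDICT (by name: the statement is the Claim_ definition above) =====
theorem solution_spec : Claim_equal_solution := by
  intro s _
  unfold Spec_solution solution solution_alt
  rw [foldl_solutionStep, splitOn_space, list_eq_solution]
  simp
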